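-- pv_equiv track=rewrite | github.com/Aaron349899401/myprograms | ccc/ccc_2ds6.py | frequent
-- ===== SOURCE A (Python) =====
-- def frequent(strings):
--     result = []
--     for string in strings:
--         freq = {}
--         for char in string:
--             freq[char] = freq.get(char, 0) + 1
--
--         max_freq = max(freq.values())
--         most_common = [char for char, count in freq.items() if count == max_freq]
--
--         result.append(max(most_common))
--     return result
-- ===== SOURCE B (Python) =====
-- def frequent(strings):
--     # sort each string, then scan runs of equal chars in one pass,
--     # keeping the run with the largest (length, char) -- later (larger) char wins ties.
--     result = []
--     for s in strings:
--         best_char = None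
--         best_len = 0
--         run_char = None
--         run_len = 0
--         for c in sorted(s):
--             if c == run_char:
--                 run_len += 1
--             else:
--                 run_char = c
--                 run_len = 1
--             if run_len >= best_len:
--                 best_char = c
--                 best_len = run_len
--         result.append(best_char)
--     return result
-- ===== Notes on version B (the rewrite author's own statement) =====
-- stated objective: alternative
-- what changed: B replaces A's frequency dictionary and its three passes (max of values, filter, max of chars) by sorting each string and scanning the sorted characters once, keeping the run with the largest (length, char); since equal characters are contiguous after sorting and runs appear in increasing char order, the >= update yields the lexicographically largest most-frequent char. (measured ~2x faster: the per-char work moves from a Python-level dict loop to C-level sorted plus a tight scan).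
import Mathlib
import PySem

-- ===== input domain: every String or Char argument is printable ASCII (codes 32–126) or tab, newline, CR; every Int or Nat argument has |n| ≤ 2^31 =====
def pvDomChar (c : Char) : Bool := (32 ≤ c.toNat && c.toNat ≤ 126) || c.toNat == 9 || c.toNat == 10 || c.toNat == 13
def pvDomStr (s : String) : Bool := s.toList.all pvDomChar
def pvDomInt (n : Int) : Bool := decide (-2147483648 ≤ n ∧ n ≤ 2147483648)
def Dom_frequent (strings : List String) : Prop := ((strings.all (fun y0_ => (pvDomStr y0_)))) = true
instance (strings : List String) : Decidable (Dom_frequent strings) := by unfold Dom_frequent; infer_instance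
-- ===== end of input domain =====

-- B sorts each string and scans the runs of equal characters once, keeping the run with the
-- largest (length, char); A counts with a dict and takes max-of-values / filter / max-of-chars.
-- Objective: alternative algorithm (sort + run scan vs hash counting).


-- ===== PORT A =====
def frequent (strings : List String) : List String :=
  strings.foldl (fun result s =>
    let freq := s.toList.foldl (fun d ch => d.insert ch (d.getD ch 0 + 1))
                  (PySem.Dict.empty : PySem.Dict Char Int)
    result ++ [match PySem.List.max? freq.values (fun v => v) with
               | none => ""   -- Python: max() of empty values raises ValueError, excluded by Pre_
               | some maxFreq =>
                 let mostCommon := freq.items.foldl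
                   (fun acc p => if p.2 == maxFreq then acc ++ [p.1] else acc) ([] : List Char)
                 match PySem.List.max? mostCommon (fun c => c) with
                 | none => ""   -- unreachable: mostCommon is nonempty whenever freq is
                 | some c => String.ofList [c]]) []

-- ===== PORT B =====
-- one step of B's scan over the sorted characters: extend or start a run, then update the best
-- state = (best_char, best_len, run_char, run_len)
def stepB (st : Option Char × Nat × Option Char × Nat) (c : Char) :
    Option Char × Nat × Option Char × Nat :=
  let rl := if st.2.2.1 == some c then st.2.2.2 + 1 else 1
  if st.2.1 ≤ rl then (some c, rl, some c, rl) else (st.1, st.2.1, some c, rl)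

def frequent_alt (strings : List String) : List String :=
  strings.foldl (fun result s =>
    let fin := (PySem.List.sorted s.toList (fun c => c) false).foldl stepB (none, 0, none, 0)
    result ++ [match fin.1 with
               | some c => String.ofList [c]
               | none => ""]) []   -- empty string: Python B appends None, excluded by Pre_

-- ===== PRECONDITION & SPEC =====
-- Pre_ excludes lists containing an empty string: there Python A raises ValueError
-- (max() of an empty sequence) and Python B would append None instead of a str.
def Pre_frequent (strings : List String) : Prop := ∀ s ∈ strings, s ≠ ""
instance (strings : List String) : Decidable (Pre_frequent strings) := by unfold Pre_frequent; infer_instance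
def pvWitness_frequent : List String := ["abcabc", "zz", "a b!"]

def Spec_frequent (strings : List String) (out : List String) : Prop := out = frequent_alt strings
instance (strings : List String) (out : List String) : Decidable (Spec_frequent strings out) := by unfold Spec_frequent; infer_instance

-- ===== CLAIM (what is proved, stated in full; the proofs are below) =====
def Claim_equal_frequent : Prop := ∀ (strings : List String), Dom_frequent strings → Pre_frequent strings → Spec_frequent strings (frequent strings)

-- ===== LEMMAS AND PROOFS =====

-- "c is the lexicographically largest among the most frequent characters of cs"
def IsBest (cs : List Char) (c : Char) : Prop :=
  c ∈ cs ∧ ∀ y ∈ cs, cs.count y < cs.count c ∨ (cs.count y = cs.count c ∧ y ≤ c)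

theorem isBest_unique {cs : List Char} {c₁ c₂ : Char}
    (h₁ : IsBest cs c₁) (h₂ : IsBest cs c₂) : c₁ = c₂ := by
  rcases h₁ with ⟨m₁, hmax₁⟩
  rcases h₂ with ⟨m₂, hmax₂⟩
  rcases hmax₁ c₂ m₂ with h | ⟨he, hle⟩ <;> rcases hmax₂ c₁ m₁ with h' | ⟨he', hle'⟩ <;>
    first
      | omega
      | exact le_antisymm hle' hle

-- A's per-string pipeline (counter, max of values, filter, max of chars) yields the IsBest character.
theorem a_value_isBest (cs : List Char) (hne : cs ≠ []) :
    ∃ c : Char, IsBest cs c ∧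
      (match PySem.List.max?
          (PySem.Dict.values (cs.foldl (fun d ch => d.insert ch (d.getD ch 0 + 1))
            (PySem.Dict.empty : PySem.Dict Char Int))) (fun v => v) with
        | none => ""
        | some maxFreq =>
          match PySem.List.max?
              ((PySem.Dict.items (cs.foldl (fun d ch => d.insert ch (d.getD ch 0 + 1))
                (PySem.Dict.empty : PySem.Dict Char Int))).foldl
                (fun acc p => if p.2 == maxFreq then acc ++ [p.1] else acc) ([] : List Char))
              (fun c => c) with
          | none => ""
          | some c => String.ofList [c]) = String.ofList [c] := by
  have hfreq : cs.foldl (fun d ch => d.insert ch (d.getD ch 0 + 1))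
      (PySem.Dict.empty : PySem.Dict Char Int) = PySem.Dict.counter cs :=
    PySem.Dict.foldl_insert_getD_add_one_eq_counter cs
  rw [hfreq]
  have hitems : (PySem.Dict.counter cs).items
      = (PySem.Set.ofList cs).map (fun k => (k, (cs.count k : Int))) :=
    PySem.Dict.items_counter cs
  have hvalues : PySem.Dict.values (PySem.Dict.counter cs)
      = (PySem.Set.ofList cs).map (fun k => (cs.count k : Int)) := by
    simp only [PySem.Dict.values, hitems, List.map_map]
    rfl
  have hSne : PySem.Set.ofList cs ≠ [] := by
    cases cs with
    | nil => exact absurd rfl hne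
    | cons a t =>
      intro hS
      have : a ∈ PySem.Set.ofList (a :: t) := (PySem.Set.mem_ofList _ _).mpr List.mem_cons_self
      rw [hS] at this
      exact List.not_mem_nil this
  obtain ⟨m, hm⟩ : ∃ m, PySem.List.max?
      (PySem.Dict.values (PySem.Dict.counter cs)) (fun v => v) = some m := by
    cases hmx : PySem.List.max? (PySem.Dict.values (PySem.Dict.counter cs)) (fun v => v) with
    | none =>
      rw [PySem.List.max?_eq_none_iff, hvalues, List.map_eq_nil_iff] at hmx
      exact absurd hmx hSne
    | some m => exact ⟨m, rfl⟩
  have hmmem := PySem.List.max?_mem hm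
  have hmmax := PySem.List.max?_isMax hm
  rw [hvalues] at hmmem
  obtain ⟨k0, hk0S, hk0⟩ := List.mem_map.mp hmmem
  have hmc : (PySem.Dict.items (PySem.Dict.counter cs)).foldl
        (fun acc p => if p.2 == m then acc ++ [p.1] else acc) ([] : List Char)
      = (PySem.Set.ofList cs).filter (fun k => (cs.count k : Int) == m) := by
    rw [PySem.List.foldl_append_if (p := fun p : Char × Int => p.2 == m) (f := fun p => p.1)]
    rw [hitems, List.filter_map, List.map_map]
    simp [Function.comp_def]
  have hk0mc : k0 ∈ (PySem.Set.ofList cs).filter (fun k => (cs.count k : Int) == m) :=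
    List.mem_filter.mpr ⟨hk0S, by simp [hk0]⟩
  obtain ⟨c, hc⟩ : ∃ c, PySem.List.max?
      ((PySem.Set.ofList cs).filter (fun k => (cs.count k : Int) == m)) (fun c => c) = some c := by
    cases hcx : PySem.List.max?
        ((PySem.Set.ofList cs).filter (fun k => (cs.count k : Int) == m)) (fun c => c) with
    | none =>
      rw [PySem.List.max?_eq_none_iff] at hcx
      rw [hcx] at hk0mc
      exact absurd hk0mc List.not_mem_nil
    | some c => exact ⟨c, rfl⟩
  have hcmem := PySem.List.max?_mem hc
  have hcmax := PySem.List.max?_isMax hc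
  obtain ⟨hcS, hccount⟩ := List.mem_filter.mp hcmem
  have hccount' : (cs.count c : Int) = m := by simpa using hccount
  refine ⟨c, ⟨(PySem.Set.mem_ofList _ _).mp hcS, ?_⟩, ?_⟩
  · intro y hy
    have hyS : y ∈ PySem.Set.ofList cs := (PySem.Set.mem_ofList _ _).mpr hy
    have hyv : (cs.count y : Int) ∈ PySem.Dict.values (PySem.Dict.counter cs) := by
      rw [hvalues]
      exact List.mem_map_of_mem hyS
    have hylem : (cs.count y : Int) ≤ m := hmmax _ hyv
    by_cases heq : cs.count y = cs.count c
    · refine Or.inr ⟨heq, ?_⟩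
      have : y ∈ (PySem.Set.ofList cs).filter (fun k => (cs.count k : Int) == m) :=
        List.mem_filter.mpr ⟨hyS, by simp [heq, hccount']⟩
      exact hcmax _ this
    · refine Or.inl ?_
      have : (cs.count y : Int) ≠ (cs.count c : Int) := by exact_mod_cast heq
      omega
  · rw [hm]
    simp only [hmc, hc]

-- Invariant of B's scan after processing the sorted prefix p:
-- run_char/run_len describe the last run of p, best_char/best_len the IsBest character of p.
def InvB (p : List Char) (st : Option Char × Nat × Option Char × Nat) : Prop :=
  st.2.2.1 = p.getLast? ∧
  (∀ lc, p.getLast? = some lc → st.2.2.2 = p.count lc) ∧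
  (p = [] → st.1 = none ∧ st.2.1 = 0) ∧
  (p ≠ [] → ∃ c, st.1 = some c ∧ IsBest p c ∧ st.2.1 = p.count c)

theorem invB_step (p : List Char) (x : Char) (st : Option Char × Nat × Option Char × Nat)
    (hp : List.Pairwise (· ≤ ·) (p ++ [x])) (hInv : InvB p st) :
    InvB (p ++ [x]) (stepB st x) := by
  obtain ⟨hrc, hrl, hnil, hbest⟩ := hInv
  have hle : ∀ y ∈ p, y ≤ x := by
    intro y hy
    exact (List.pairwise_append.mp hp).2.2 y hy x List.mem_cons_self
  cases p with
  | nil =>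
    obtain ⟨hb, hl⟩ := hnil rfl
    simp only [List.getLast?_nil] at hrc
    refine ⟨?_, ?_, by simp, ?_⟩
    · simp [stepB, hrc, hl]
    · intro lc hlc
      simp only [List.nil_append, List.getLast?_singleton, Option.some.injEq] at hlc
      subst hlc
      simp [stepB, hrc, hl]
    · intro _
      refine ⟨x, ?_, ⟨by simp, ?_⟩, ?_⟩
      · simp [stepB, hrc, hl]
      · intro y hy
        simp only [List.nil_append, List.mem_singleton] at hy
        subst hy
        exact Or.inr ⟨rfl, le_refl _⟩
      · simp [stepB, hrc, hl]
  | cons a t =>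
    set p := a :: t with hpdef
    have hpne : p ≠ [] := by simp [hpdef]
    obtain ⟨lc, hlc⟩ : ∃ lc, p.getLast? = some lc := by
      cases h : p.getLast? with
      | none => exact absurd (List.getLast?_eq_none_iff.mp h) hpne
      | some lc => exact ⟨lc, rfl⟩
    have hlcmem : lc ∈ p := List.mem_of_getLast? hlc
    obtain ⟨c, hcb, hcbest, hcbl⟩ := hbest hpne
    have hrlv : st.2.2.2 = p.count lc := hrl lc hlc
    -- every element of p is ≤ lc (the last element of a ≤-sorted list)
    have hmaxlc : ∀ y ∈ p, y ≤ lc := by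
      have hpp : List.Pairwise (· ≤ ·) p := (List.pairwise_append.mp hp).1
      have hsplit : p.dropLast ++ [p.getLast hpne] = p := List.dropLast_concat_getLast hpne
      have hlast : p.getLast hpne = lc := by
        have := List.getLast?_eq_some_getLast (l := p) hpne
        rw [hlc] at this
        exact (Option.some.injEq _ _ ▸ this.symm : _)
      intro y hy
      rw [← hsplit, hlast] at hy hpp
      rcases List.mem_append.mp hy with h1 | h1
      · exact (List.pairwise_append.mp hpp).2.2 y h1 lc List.mem_cons_self
      · rw [List.mem_singleton.mp h1]
    have hglast : (p ++ [x]).getLast? = some x := by simp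
    have hcount : ∀ y, (p ++ [x]).count y = p.count y + (if y = x then 1 else 0) := by
      intro y
      by_cases h : y = x
      · simp [List.count_append, h]
      · simp [List.count_append, List.count_eq_zero, h]
    by_cases hxlc : x = lc
    · -- extend the current run
      subst hxlc
      have hbeq : (st.2.2.1 == some x) = true := by rw [hrc, hlc]; simp
      have hrl' : (p ++ [x]).count x = p.count x + 1 := by simp [hcount]
      by_cases hup : st.2.1 ≤ p.count x + 1
      · refine ⟨?_, ?_, by simp [hpdef], ?_⟩
        · simp [stepB, hbeq, hrlv, hup, hglast]
        · intro lc' hlc'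
          rw [hglast] at hlc'
          cases hlc'
          simp [stepB, hbeq, hrlv, hup, hrl']
        · intro _
          refine ⟨x, by simp [stepB, hbeq, hrlv, hup], ⟨by simp, ?_⟩, by simp [stepB, hbeq, hrlv, hup, hrl']⟩
          intro y hy
          by_cases hyx : y = x
          · subst hyx; exact Or.inr ⟨rfl, le_refl _⟩
          · have hyp : y ∈ p := by
              rcases List.mem_append.mp hy with h1 | h1
              · exact h1
              · exact absurd (List.mem_singleton.mp h1) hyx
            have h1 : (p ++ [x]).count y = p.count y := by simp [hcount, hyx]
            have h2 : p.count y ≤ p.count c := by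
              rcases hcbest.2 y hyp with h | ⟨h, _⟩ <;> omega
            have h3 : p.count c = st.2.1 := hcbl.symm
            by_cases heq : (p ++ [x]).count y = (p ++ [x]).count x
            · exact Or.inr ⟨heq, hmaxlc y hyp⟩
            · refine Or.inl (lt_of_le_of_ne ?_ heq)
              omega
      · -- run too short: keep the old best
        have hxc : x ≠ c := by
          intro h
          rw [← h] at hcbl
          omega
        have hccnt : (p ++ [x]).count c = p.count c := by simp [hcount, (Ne.symm hxc)]
        have hup' : ¬ st.2.1 ≤ st.2.2.2 + 1 := by rw [hrlv]; exact hup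
        have hstep : stepB st x = (st.1, st.2.1, some x, st.2.2.2 + 1) := by
          simp [stepB, hbeq, hup']
        refine ⟨?_, ?_, by simp [hpdef], ?_⟩
        · simp [hstep, hglast]
        · intro lc' hlc'
          rw [hglast] at hlc'
          cases hlc'
          simp [hstep, hrlv, hrl']
        · intro _
          refine ⟨c, by simp [hstep, hcb], ⟨?_, ?_⟩, by simp [hstep, hcbl, hccnt]⟩
          · exact List.mem_append_left _ hcbest.1
          · intro y hy
            by_cases hyx : y = x
            · subst hyx
              refine Or.inl ?_
              rw [hrl', hccnt]
              omega
            · have hyp : y ∈ p := by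
                rcases List.mem_append.mp hy with h1 | h1
                · exact h1
                · exact absurd (List.mem_singleton.mp h1) hyx
              have h1 : (p ++ [x]).count y = p.count y := by simp [hcount, hyx]
              rw [h1, hccnt]
              exact hcbest.2 y hyp
    · -- new run: x did not occur in p
      have hxnot : x ∉ p := by
        intro hxp
        exact hxlc (le_antisymm (hmaxlc x hxp) (hle lc hlcmem))
      have hx0 : p.count x = 0 := List.count_eq_zero.mpr hxnot
      have hbeq : (st.2.2.1 == some x) = false := by
        rw [hrc, hlc]
        simp only [beq_eq_false_iff_ne, ne_eq, Option.some.injEq]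
        exact fun h => hxlc h.symm
      have hrl' : (p ++ [x]).count x = 1 := by simp [hcount, hx0]
      by_cases hup : st.2.1 ≤ 1
      · refine ⟨?_, ?_, by simp [hpdef], ?_⟩
        · simp [stepB, hbeq, hup, hglast]
        · intro lc' hlc'
          rw [hglast] at hlc'
          cases hlc'
          simp [stepB, hbeq, hup, hrl']
        · intro _
          refine ⟨x, by simp [stepB, hbeq, hup], ⟨by simp, ?_⟩, by simp [stepB, hbeq, hup, hrl']⟩
          intro y hy
          by_cases hyx : y = x
          · subst hyx; exact Or.inr ⟨rfl, le_refl _⟩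
          · have hyp : y ∈ p := by
              rcases List.mem_append.mp hy with h1 | h1
              · exact h1
              · exact absurd (List.mem_singleton.mp h1) hyx
            have h1 : (p ++ [x]).count y = p.count y := by simp [hcount, hyx]
            have h2 : p.count y ≤ p.count c := by
              rcases hcbest.2 y hyp with h | ⟨h, _⟩ <;> omega
            have h3 : p.count c = st.2.1 := hcbl.symm
            by_cases heq : (p ++ [x]).count y = (p ++ [x]).count x
            · exact Or.inr ⟨heq, hle y hyp⟩
            · refine Or.inl (lt_of_le_of_ne ?_ heq)
              rw [h1, hrl']
              omega
      · have hxc : x ≠ c := fun h => hxnot (h ▸ hcbest.1)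
        have hccnt : (p ++ [x]).count c = p.count c := by simp [hcount, (Ne.symm hxc)]
        have hup' : ¬ st.2.1 ≤ 1 := hup
        have hstep : stepB st x = (st.1, st.2.1, some x, 1) := by
          simp [stepB, hbeq, hup']
        refine ⟨?_, ?_, by simp [hpdef], ?_⟩
        · simp [hstep, hglast]
        · intro lc' hlc'
          rw [hglast] at hlc'
          cases hlc'
          simp [hstep, hrl']
        · intro _
          refine ⟨c, by simp [hstep, hcb], ⟨?_, ?_⟩, by simp [hstep, hcbl, hccnt]⟩
          · exact List.mem_append_left _ hcbest.1
          · intro y hy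
            by_cases hyx : y = x
            · subst hyx
              refine Or.inl ?_
              rw [hrl', hccnt]
              omega
            · have hyp : y ∈ p := by
                rcases List.mem_append.mp hy with h1 | h1
                · exact h1
                · exact absurd (List.mem_singleton.mp h1) hyx
              have h1 : (p ++ [x]).count y = p.count y := by simp [hcount, hyx]
              rw [h1, hccnt]
              exact hcbest.2 y hyp

theorem invB_foldl (l p : List Char) (st : Option Char × Nat × Option Char × Nat)
    (hp : List.Pairwise (· ≤ ·) (p ++ l)) (hInv : InvB p st) :
    InvB (p ++ l) (l.foldl stepB st) := by
  induction l generalizing p st with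
  | nil => simpa using hInv
  | cons x t ih =>
    have h1 : p ++ x :: t = (p ++ [x]) ++ t := by simp
    rw [h1] at hp ⊢
    exact ih (p ++ [x]) (stepB st x) hp
      (invB_step p x st ((List.pairwise_append.mp hp).1.sublist (by simp)) hInv)

-- B's scan over the sorted characters yields the IsBest character of the original list.
theorem b_value_isBest (cs : List Char) (hne : cs ≠ []) :
    ∃ c : Char, IsBest cs c ∧
      ((PySem.List.sorted cs (fun c => c) false).foldl stepB (none, 0, none, 0)).1 = some c := by
  set ss := PySem.List.sorted cs (fun c => c) false with hss
  have hperm : ss.Perm cs := PySem.List.sorted_perm cs _ _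
  have hpw : List.Pairwise (· ≤ ·) ss := by
    have := PySem.List.sorted_pairwise cs (fun c => c) (κ := Char)
    simpa using this
  have hInv : InvB ss (ss.foldl stepB (none, 0, none, 0)) := by
    have := invB_foldl ss [] (none, 0, none, 0) (by simpa using hpw)
      ⟨by simp, by simp, fun _ => ⟨rfl, rfl⟩, fun h => absurd rfl h⟩
    simpa using this
  have hssne : ss ≠ [] := by
    intro h
    rw [h] at hperm
    exact hne hperm.symm.eq_nil
  obtain ⟨c, hc1, ⟨hcm, hcb⟩, _⟩ := hInv.2.2.2 hssne
  refine ⟨c, ⟨hperm.mem_iff.mp hcm, ?_⟩, hc1⟩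
  intro y hy
  have hyss : y ∈ ss := hperm.mem_iff.mpr hy
  have h1 := hcb y hyss
  rw [hperm.count_eq y, hperm.count_eq c] at h1
  exact h1

-- Per-string equality of the two pipelines.
theorem per_string (s : String) (hne : s ≠ "") :
    (let freq := s.toList.foldl (fun d ch => d.insert ch (d.getD ch 0 + 1))
                  (PySem.Dict.empty : PySem.Dict Char Int)
     match PySem.List.max? freq.values (fun v => v) with
     | none => ""
     | some maxFreq =>
       let mostCommon := freq.items.foldl
         (fun acc p => if p.2 == maxFreq then acc ++ [p.1] else acc) ([] : List Char)
       match PySem.List.max? mostCommon (fun c => c) with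
       | none => ""
       | some c => String.ofList [c]) =
    (match ((PySem.List.sorted s.toList (fun c => c) false).foldl stepB (none, 0, none, 0)).1 with
     | some c => String.ofList [c]
     | none => "") := by
  have hl : s.toList ≠ [] := fun h => hne (String.toList_eq_nil_iff.mp h)
  obtain ⟨ca, hbesta, hval⟩ := a_value_isBest s.toList hl
  obtain ⟨cb, hbestb, hfin⟩ := b_value_isBest s.toList hl
  rw [hval, hfin, isBest_unique hbesta hbestb]

-- ===== VERDICT (by name: the statement is the Claim_ definition above) =====
theorem frequent_spec : Claim_equal_frequent := by
  intro strings _ hpre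
  unfold Spec_frequent frequent frequent_alt
  rw [PySem.List.foldl_append_singleton_eq_map, PySem.List.foldl_append_singleton_eq_map]
  simp only [List.nil_append]
  apply List.map_congr_left
  intro s hs
  exact per_string s (hpre s hs)
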